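-- pv_equiv track=rewrite | github.com/traneric/computational_genomics_2024 | scripts/detect_amr_mge_intersections.py | detect_intersects
-- ===== SOURCE A (Python) =====
-- def detect_intersects(gene_coordinates, mge_coordinates):
--
--     intersects = {} # Key :Contig_ID , Value: duplicate_data
--     total_num_genes = sum(len(meta) for meta in gene_coordinates.values())
--     num_genes_inside_mge = 0
--
--     for contig_id, gene_meta_list in gene_coordinates.items():
--
--         # No MGEs were found in this sequence_id
--         if contig_id not in mge_coordinates.keys():
--             continue
--
--         # Initialize key to track duplicates that intersect in this sequence region
--         if contig_id not in intersects.keys():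
--             intersects[contig_id] = []
--
--         # Extract all mges that corresponds to this sequence_id
--         sequence_mge_data = mge_coordinates[contig_id]
--
--         # Iterate through each amr gene and see if it intersects with an MGE
--         for gene_meta in gene_meta_list:
--             gene_start = int(gene_meta[0])
--             gene_end = int(gene_meta[1])
--
--             for mge_meta in sequence_mge_data:
--                 mge_start = int(mge_meta[0]) - 31000
--                 mge_end = int(mge_meta[1]) + 31000
--
--                 # Check if the ranges intersect
--                 if (gene_start <= mge_end and gene_end >= mge_start):
--                     intersects[contig_id].append(gene_meta)
--                     num_genes_inside_mge += 1
--                     break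
--
--     num_amr_genes_outside_mge = total_num_genes - num_genes_inside_mge
--     intersection_analysis_data = [total_num_genes, num_genes_inside_mge, num_amr_genes_outside_mge]
--
--     return intersection_analysis_data
-- ===== SOURCE B (Python) =====
-- def _bisect_right(xs, x):
--     lo, hi = 0, len(xs)
--     while lo < hi:
--         mid = (lo + hi) // 2
--         if x < xs[mid]:
--             hi = mid
--         else:
--             lo = mid + 1
--     return lo
--
--
-- def detect_intersects(gene_coordinates, mge_coordinates):
--     total_num_genes = sum(len(meta) for meta in gene_coordinates.values())
--     num_genes_inside_mge = 0
--
--     for contig_id, gene_meta_list in gene_coordinates.items():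
--         sequence_mge_data = mge_coordinates.get(contig_id)
--         if sequence_mge_data is None or not gene_meta_list:
--             continue
--
--         # Expanded intervals as (start, end), sorted by start; a gene [gs, ge]
--         # overlaps some interval iff an interval with start <= ge has end >= gs,
--         # i.e. iff the prefix-maximum of ends over {start <= ge} reaches gs.
--         pairs = sorted(((int(m[0]) - 31000, int(m[1]) + 31000) for m in sequence_mge_data),
--                        key=lambda p: p[0])
--         starts = [p[0] for p in pairs]
--         pmax = []
--         best = None
--         for p in pairs:
--             best = p[1] if best is None or p[1] > best else best
--             pmax.append(best)
--
--         for gene_meta in gene_meta_list: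
--             j = _bisect_right(starts, int(gene_meta[1]))
--             if j > 0 and pmax[j - 1] >= int(gene_meta[0]):
--                 num_genes_inside_mge += 1
--
--     return [total_num_genes, num_genes_inside_mge,
--             total_num_genes - num_genes_inside_mge]
-- ===== Notes on version B (the rewrite author's own statement) =====
-- stated objective: alternative
-- what changed: Per contig, B sorts the expanded MGE intervals by start, builds a prefix-maximum of their ends, and answers each gene with one binary search, instead of A's per-gene linear scan with early break over all MGE intervals; B also drops the intersects dict A builds but never returns.
-- outside the precondition, e.g. on detect_intersects({'c': [[0, 100]]}, {'c': [[0, 0], [5]]}): A returns [1, 1, 0], B raises IndexError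
import Mathlib
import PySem

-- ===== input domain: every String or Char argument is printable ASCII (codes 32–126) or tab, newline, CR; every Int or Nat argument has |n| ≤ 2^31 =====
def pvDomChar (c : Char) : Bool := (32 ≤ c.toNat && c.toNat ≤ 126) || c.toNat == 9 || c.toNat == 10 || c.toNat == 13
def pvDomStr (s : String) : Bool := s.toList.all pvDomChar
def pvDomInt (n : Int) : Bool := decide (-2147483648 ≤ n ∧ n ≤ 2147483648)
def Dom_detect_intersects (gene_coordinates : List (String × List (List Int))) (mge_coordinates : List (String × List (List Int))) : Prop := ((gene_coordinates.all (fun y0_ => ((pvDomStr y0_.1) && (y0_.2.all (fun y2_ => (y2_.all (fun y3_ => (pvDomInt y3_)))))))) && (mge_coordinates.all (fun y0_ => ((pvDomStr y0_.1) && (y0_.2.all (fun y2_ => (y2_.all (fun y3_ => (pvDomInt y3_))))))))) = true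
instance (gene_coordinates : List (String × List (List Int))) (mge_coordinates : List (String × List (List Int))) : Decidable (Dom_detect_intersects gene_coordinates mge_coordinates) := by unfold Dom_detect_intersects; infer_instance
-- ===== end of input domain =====

-- B replaces A's per-gene linear scan over all MGE intervals of a contig by a
-- per-contig sort of the expanded intervals with a prefix-maximum of their ends
-- and a binary search per gene; only the RETURN VALUE is compared (A also fills
-- a local dict it never returns).

-- ===== PORT A =====
-- inner `for mge_meta in sequence_mge_data: … break` loop of A
def aGeneLoop (mges : List (List Int)) (cid : String) (g : List Int) (gs ge : Int)
    (st : PySem.Dict String (List (List Int)) × Int) : PySem.Dict String (List (List Int)) × Int :=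
  match mges with
  | [] => st
  | m :: rest =>
    let ms := (PySem.List.pyGet? m 0).getD 0 - 31000
    let me := (PySem.List.pyGet? m 1).getD 0 + 31000
    if gs ≤ me ∧ ms ≤ ge then
      (PySem.Dict.modify st.1 cid [] (fun l => l ++ [g]), st.2 + 1)
    else aGeneLoop rest cid g gs ge st

-- body of A's outer `for contig_id, gene_meta_list in gene_coordinates.items()` loop
def aStep (mge_coordinates : List (String × List (List Int)))
    (st : PySem.Dict String (List (List Int)) × Int) (p : String × List (List Int)) :
    PySem.Dict String (List (List Int)) × Int :=
  match PySem.Dict.get? (PySem.Dict.mk mge_coordinates) p.1 with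
  | none => st
  | some mges =>
    let d := if (PySem.Dict.get? st.1 p.1).isSome then st.1 else PySem.Dict.insert st.1 p.1 []
    p.2.foldl (fun st2 g =>
        aGeneLoop mges p.1 g ((PySem.List.pyGet? g 0).getD 0) ((PySem.List.pyGet? g 1).getD 0) st2)
      (d, st.2)

def detect_intersects (gene_coordinates : List (String × List (List Int))) (mge_coordinates : List (String × List (List Int))) : List Int :=
  let total : Int := (gene_coordinates.map (fun p => (p.2.length : Int))).sum
  let st := gene_coordinates.foldl (aStep mge_coordinates) (PySem.Dict.mk [], 0)
  [total, st.2, total - st.2]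

-- ===== PORT B =====
-- the `best`/`pmax` running-maximum loop of Source B
def prefMax (ps : List (Int × Int)) (best : Option Int) : List Int :=
  match ps with
  | [] => []
  | p :: rest =>
    let b := match best with
      | none => p.2
      | some b => if p.2 > b then p.2 else b
    b :: prefMax rest (some b)

-- body of Source B's outer loop over gene_coordinates.items()
def bStep (mge_coordinates : List (String × List (List Int)))
    (acc : Int) (p : String × List (List Int)) : Int :=
  match PySem.Dict.get? (PySem.Dict.mk mge_coordinates) p.1 with
  | none => acc
  | some mges =>
    if p.2 = [] then acc else
    let pairs := PySem.List.sorted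
      (mges.map (fun m => ((PySem.List.pyGet? m 0).getD 0 - 31000, (PySem.List.pyGet? m 1).getD 0 + 31000)))
      Prod.fst
    let starts := pairs.map Prod.fst
    let pmax := prefMax pairs none
    p.2.foldl (fun a g =>
      let j := PySem.List.bisectRight starts ((PySem.List.pyGet? g 1).getD 0)
      if 0 < j ∧ (PySem.List.pyGet? g 0).getD 0 ≤ pmax.getD (j - 1) 0 then a + 1 else a) acc

def detect_intersects_alt (gene_coordinates : List (String × List (List Int))) (mge_coordinates : List (String × List (List Int))) : List Int :=
  let total : Int := (gene_coordinates.map (fun p => (p.2.length : Int))).sum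
  let inside : Int := gene_coordinates.foldl (bStep mge_coordinates) 0
  [total, inside, total - inside]

-- ===== PRECONDITION & SPEC =====
-- Pre_ excludes the inputs where a coordinate row that gets read has fewer than two
-- entries (Python raises IndexError); it also excludes short MGE rows that A happens
-- to skip via its early `break` but B must read, on which A still returns.
def Pre_detect_intersects (gene_coordinates : List (String × List (List Int))) (mge_coordinates : List (String × List (List Int))) : Prop :=
  ∀ p ∈ gene_coordinates, ∀ mges,
    PySem.Dict.get? (PySem.Dict.mk mge_coordinates) p.1 = some mges → p.2 ≠ [] →
      (∀ g ∈ p.2, 2 ≤ g.length) ∧ (∀ m ∈ mges, 2 ≤ m.length)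
instance (gene_coordinates : List (String × List (List Int))) (mge_coordinates : List (String × List (List Int))) : Decidable (Pre_detect_intersects gene_coordinates mge_coordinates) := by unfold Pre_detect_intersects; infer_instance

def pvWitness_detect_intersects : (List (String × List (List Int))) × (List (String × List (List Int))) :=
  ([("a", [[1, 2]])], [("a", [[5, 6]])])

def Spec_detect_intersects (gene_coordinates : List (String × List (List Int))) (mge_coordinates : List (String × List (List Int))) (out : List Int) : Prop := out = detect_intersects_alt gene_coordinates mge_coordinates
instance (gene_coordinates : List (String × List (List Int))) (mge_coordinates : List (String × List (List Int))) (out : List Int) : Decidable (Spec_detect_intersects gene_coordinates mge_coordinates out) := by unfold Spec_detect_intersects; infer_instance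

-- ===== CLAIM (what is proved, stated in full; the proofs are below) =====
def Claim_equal_detect_intersects : Prop := ∀ (gene_coordinates : List (String × List (List Int))) (mge_coordinates : List (String × List (List Int))), Dom_detect_intersects gene_coordinates mge_coordinates → Pre_detect_intersects gene_coordinates mge_coordinates → Spec_detect_intersects gene_coordinates mge_coordinates (detect_intersects gene_coordinates mge_coordinates)

-- ===== LEMMAS AND PROOFS =====

-- a gene overlaps one expanded MGE interval
def overlapB (gs ge : Int) (m : List Int) : Bool :=
  decide (gs ≤ (PySem.List.pyGet? m 1).getD 0 + 31000 ∧ (PySem.List.pyGet? m 0).getD 0 - 31000 ≤ ge)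

-- per contig: the count both programs compute
def contigCount (mges : List (List Int)) (genes : List (List Int)) : Int :=
  (genes.countP (fun g => mges.any (overlapB ((PySem.List.pyGet? g 0).getD 0) ((PySem.List.pyGet? g 1).getD 0))) : Int)

-- contribution of one entry of gene_coordinates
def contigOf (mge_coordinates : List (String × List (List Int))) (p : String × List (List Int)) : Int :=
  match PySem.Dict.get? (PySem.Dict.mk mge_coordinates) p.1 with
  | none => 0
  | some mges => contigCount mges p.2

-- the value `best` takes after one step of Source B's running-maximum loop
def pmInit (b : Option Int) (p : Int × Int) : Int :=
  match b with
  | none => p.2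
  | some v => if p.2 > v then p.2 else v

lemma prefMax_cons (p : Int × Int) (rest : List (Int × Int)) (b : Option Int) :
    prefMax (p :: rest) b = pmInit b p :: prefMax rest (some (pmInit b p)) := by
  cases b <;> rfl

lemma pmInit_ge_snd (b : Option Int) (p : Int × Int) : p.2 ≤ pmInit b p := by
  cases b <;> simp [pmInit] <;> split <;> omega

lemma pmInit_ge_init (v : Int) (p : Int × Int) : v ≤ pmInit (some v) p := by
  simp [pmInit]; split <;> omega

lemma pmInit_cases (b : Option Int) (p : Int × Int) :
    pmInit b p = p.2 ∨ ∃ v, b = some v ∧ pmInit b p = v := by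
  cases b with
  | none => exact Or.inl rfl
  | some v =>
    by_cases h : p.2 > v
    · exact Or.inl (by simp [pmInit, h])
    · exact Or.inr ⟨v, rfl, by simp [pmInit, h]⟩

lemma aGeneLoop_snd (mges : List (List Int)) (cid : String) (g : List Int) (gs ge : Int)
    (st : PySem.Dict String (List (List Int)) × Int) :
    (aGeneLoop mges cid g gs ge st).2 = st.2 + (if mges.any (overlapB gs ge) then 1 else 0) := by
  induction mges generalizing st with
  | nil => simp [aGeneLoop]
  | cons m rest ih =>
    simp only [aGeneLoop, List.any_cons]
    by_cases h : gs ≤ (PySem.List.pyGet? m 1).getD 0 + 31000 ∧ (PySem.List.pyGet? m 0).getD 0 - 31000 ≤ ge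
    · have hov : overlapB gs ge m = true := by
        simp only [overlapB, decide_eq_true_iff]; exact h
      rw [if_pos h]
      simp [hov]
    · have hov : overlapB gs ge m = false := by
        simp only [overlapB, decide_eq_false_iff_not]; exact h
      rw [if_neg h, ih]
      simp [hov]

lemma aGeneFold_snd (mges : List (List Int)) (cid : String) (genes : List (List Int))
    (st : PySem.Dict String (List (List Int)) × Int) :
    (genes.foldl (fun st2 g =>
        aGeneLoop mges cid g ((PySem.List.pyGet? g 0).getD 0) ((PySem.List.pyGet? g 1).getD 0) st2)
      st).2 = st.2 + contigCount mges genes := by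
  induction genes generalizing st with
  | nil => simp [contigCount]
  | cons g rest ih =>
    simp only [List.foldl_cons, ih, aGeneLoop_snd, contigCount, List.countP_cons]
    split <;> simp_all <;> push_cast <;> ring

lemma aStep_snd (mge_coordinates : List (String × List (List Int)))
    (st : PySem.Dict String (List (List Int)) × Int) (p : String × List (List Int)) :
    (aStep mge_coordinates st p).2 = st.2 + contigOf mge_coordinates p := by
  unfold aStep contigOf
  cases hq : PySem.Dict.get? (PySem.Dict.mk mge_coordinates) p.1 with
  | none => simp
  | some mges => simp [aGeneFold_snd]

lemma a_outer_fold (mge_coordinates gc : List (String × List (List Int)))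
    (st : PySem.Dict String (List (List Int)) × Int) :
    (gc.foldl (aStep mge_coordinates) st).2 = st.2 + (gc.map (contigOf mge_coordinates)).sum := by
  induction gc generalizing st with
  | nil => simp
  | cons p rest ih => simp only [List.foldl_cons, ih, aStep_snd, List.map_cons, List.sum_cons]; ring

lemma prefMax_ub (ps : List (Int × Int)) (b : Option Int) (i : Nat) (hi : i < ps.length) :
    (∀ k, k ≤ i → (ps.getD k (0, 0)).2 ≤ (prefMax ps b).getD i 0) ∧
      (∀ v, b = some v → v ≤ (prefMax ps b).getD i 0) := by
  induction ps generalizing b i with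
  | nil => simp at hi
  | cons p rest ih =>
    rw [prefMax_cons]
    match i with
    | 0 =>
      refine ⟨fun k hk => ?_, fun v hv => ?_⟩
      · interval_cases k
        simpa using pmInit_ge_snd b p
      · subst hv
        simpa using pmInit_ge_init v p
    | Nat.succ i =>
      have hi' : i < rest.length := by simpa using hi
      have ihr := ih (some (pmInit b p)) i hi'
      have hval : pmInit b p ≤ (prefMax rest (some (pmInit b p))).getD i 0 := ihr.2 _ rfl
      refine ⟨fun k hk => ?_, fun v hv => ?_⟩
      · rw [List.getD_cons_succ]
        match k with
        | 0 =>
          rw [List.getD_cons_zero]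
          exact le_trans (pmInit_ge_snd b p) hval
        | Nat.succ k =>
          rw [List.getD_cons_succ]
          exact ihr.1 k (by omega)
      · rw [List.getD_cons_succ]
        subst hv
        exact le_trans (pmInit_ge_init v p) hval

lemma prefMax_mem (ps : List (Int × Int)) (b : Option Int) (i : Nat) (hi : i < ps.length) :
    (∃ k, k ≤ i ∧ k < ps.length ∧ (prefMax ps b).getD i 0 = (ps.getD k (0, 0)).2) ∨
      (∃ v, b = some v ∧ (prefMax ps b).getD i 0 = v) := by
  induction ps generalizing b i with
  | nil => simp at hi
  | cons p rest ih =>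
    rw [prefMax_cons]
    match i with
    | 0 =>
      rcases pmInit_cases b p with h | ⟨v, hv, h⟩
      · exact Or.inl ⟨0, le_refl 0, by simp, by simpa using h⟩
      · exact Or.inr ⟨v, hv, by simpa using h⟩
    | Nat.succ i =>
      have hi' : i < rest.length := by simpa using hi
      rw [List.getD_cons_succ]
      rcases ih (some (pmInit b p)) i hi' with ⟨k, hk, hklen, hval⟩ | ⟨v, hv, hval⟩
      · exact Or.inl ⟨k + 1, by omega, by simpa using hklen, by simpa using hval⟩
      · have hv' : v = pmInit b p := by injection hv.symm
        subst hv'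
        rcases pmInit_cases b p with h | ⟨w, hw, h⟩
        · exact Or.inl ⟨0, by omega, by simp, by simpa using (hval.trans h)⟩
        · exact Or.inr ⟨w, hw, hval.trans h⟩

lemma stairPred (pairs : List (Int × Int)) (hpw : List.Pairwise (fun a b => a ≤ b) (pairs.map Prod.fst))
    (gs ge : Int) :
    (0 < PySem.List.bisectRight (pairs.map Prod.fst) ge ∧
      gs ≤ (prefMax pairs none).getD (PySem.List.bisectRight (pairs.map Prod.fst) ge - 1) 0)
      ↔ ∃ q ∈ pairs, q.1 ≤ ge ∧ gs ≤ q.2 := by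
  obtain ⟨hjle, hlt, hgt⟩ := PySem.List.bisectRight_spec (pairs.map Prod.fst) ge hpw
  simp only [List.length_map, List.getElem_map] at hjle hlt hgt
  set j := PySem.List.bisectRight (pairs.map Prod.fst) ge with hj
  constructor
  · rintro ⟨hj0, hle⟩
    have hj1 : j - 1 < pairs.length := by omega
    rcases prefMax_mem pairs none (j - 1) hj1 with ⟨k, hk, hklen, hval⟩ | ⟨v, hv, _⟩
    · rw [hval, List.getD_eq_getElem _ _ hklen] at hle
      exact ⟨pairs[k], List.getElem_mem _, hlt k hklen (by omega), hle⟩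
    · exact absurd hv (by simp)
  · rintro ⟨q, hq, h1, h2⟩
    obtain ⟨i, hilen, rfl⟩ := List.mem_iff_getElem.mp hq
    have hij : i < j := by
      by_contra hcon
      have := hgt i hilen (by omega)
      omega
    have hj1 : j - 1 < pairs.length := by omega
    refine ⟨by omega, ?_⟩
    have := (prefMax_ub pairs none (j - 1) hj1).1 i (by omega)
    rw [List.getD_eq_getElem _ _ hilen] at this
    omega

lemma bGenePred (mges : List (List Int)) (gs ge : Int) :
    (0 < PySem.List.bisectRight
        ((PySem.List.sorted (mges.map (fun m => ((PySem.List.pyGet? m 0).getD 0 - 31000, (PySem.List.pyGet? m 1).getD 0 + 31000))) Prod.fst).map Prod.fst) ge ∧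
      gs ≤ (prefMax (PySem.List.sorted (mges.map (fun m => ((PySem.List.pyGet? m 0).getD 0 - 31000, (PySem.List.pyGet? m 1).getD 0 + 31000))) Prod.fst) none).getD
        (PySem.List.bisectRight
          ((PySem.List.sorted (mges.map (fun m => ((PySem.List.pyGet? m 0).getD 0 - 31000, (PySem.List.pyGet? m 1).getD 0 + 31000))) Prod.fst).map Prod.fst) ge - 1) 0)
      ↔ mges.any (overlapB gs ge) = true := by
  rw [stairPred _ (PySem.List.sorted_map_key_pairwise _ _) gs ge]
  rw [List.any_eq_true]
  constructor
  · rintro ⟨q, hq, h1, h2⟩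
    rw [PySem.List.mem_sorted] at hq
    obtain ⟨m, hm, rfl⟩ := List.mem_map.mp hq
    exact ⟨m, hm, by simp only [overlapB, decide_eq_true_iff]; exact ⟨h2, h1⟩⟩
  · rintro ⟨m, hm, hov⟩
    simp only [overlapB, decide_eq_true_iff] at hov
    refine ⟨((PySem.List.pyGet? m 0).getD 0 - 31000, (PySem.List.pyGet? m 1).getD 0 + 31000), ?_, hov.2, hov.1⟩
    rw [PySem.List.mem_sorted]
    exact List.mem_map_of_mem hm

lemma bGeneFold (mges : List (List Int)) (genes : List (List Int)) (acc : Int) :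
    (genes.foldl (fun a g =>
        if 0 < PySem.List.bisectRight
              ((PySem.List.sorted (mges.map (fun m => ((PySem.List.pyGet? m 0).getD 0 - 31000, (PySem.List.pyGet? m 1).getD 0 + 31000))) Prod.fst).map Prod.fst)
              ((PySem.List.pyGet? g 1).getD 0) ∧
            (PySem.List.pyGet? g 0).getD 0 ≤
              (prefMax (PySem.List.sorted (mges.map (fun m => ((PySem.List.pyGet? m 0).getD 0 - 31000, (PySem.List.pyGet? m 1).getD 0 + 31000))) Prod.fst) none).getD
                (PySem.List.bisectRight
                  ((PySem.List.sorted (mges.map (fun m => ((PySem.List.pyGet? m 0).getD 0 - 31000, (PySem.List.pyGet? m 1).getD 0 + 31000))) Prod.fst).map Prod.fst)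
                  ((PySem.List.pyGet? g 1).getD 0) - 1) 0
          then a + 1 else a)
      acc) = acc + contigCount mges genes := by
  induction genes generalizing acc with
  | nil => simp [contigCount]
  | cons g rest ih =>
    rw [List.foldl_cons, ih]
    simp only [contigCount, List.countP_cons]
    by_cases hA : mges.any (overlapB ((PySem.List.pyGet? g 0).getD 0) ((PySem.List.pyGet? g 1).getD 0)) = true
    · rw [if_pos ((bGenePred mges _ _).mpr hA), if_pos hA]
      push_cast; ring
    · rw [if_neg (fun hc => hA ((bGenePred mges _ _).mp hc)), if_neg hA]
      push_cast; ring

lemma bStep_eq (mge_coordinates : List (String × List (List Int)))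
    (acc : Int) (p : String × List (List Int)) :
    bStep mge_coordinates acc p = acc + contigOf mge_coordinates p := by
  unfold bStep contigOf
  cases hq : PySem.Dict.get? (PySem.Dict.mk mge_coordinates) p.1 with
  | none => simp
  | some mges =>
    by_cases hnil : p.2 = []
    · simp [hnil, contigCount]
    · simp only [if_neg hnil]
      exact bGeneFold mges p.2 acc

lemma b_outer_fold (mge_coordinates gc : List (String × List (List Int))) (acc : Int) :
    gc.foldl (bStep mge_coordinates) acc = acc + (gc.map (contigOf mge_coordinates)).sum := by
  induction gc generalizing acc with
  | nil => simp
  | cons p rest ih => simp only [List.foldl_cons, ih, bStep_eq, List.map_cons, List.sum_cons]; ring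

-- ===== VERDICT (by name: the statement is the Claim_ definition above) =====
theorem detect_intersects_spec : Claim_equal_detect_intersects := by
  intro gc mc _ _
  unfold Spec_detect_intersects detect_intersects detect_intersects_alt
  simp only [a_outer_fold, b_outer_fold]
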